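-- pv_equiv track=rewrite | github.com/shutpa01/cryptic_solver_v2 | classifier/align_fodder.py | _align_hidden
-- ===== SOURCE A (Python) =====
-- def _align_hidden(yields, available, tokens, consumed):
--     """Find where yields appears hidden in concatenated clue words."""
--     if not yields:
--         return None
--
--     target = yields.lower().replace(" ", "")
--
--     # Try all possible contiguous spans
--     for start in range(len(tokens)):
--         for end in range(start + 1, len(tokens) + 1):
--             indices = set(range(start, end))
--             if not indices - consumed:
--                 continue
--             concat = "".join(tokens[j][1] for j in range(start, end))
--             if target in concat and concat != target:
--                 # The hidden word must span across words (not be a single word)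
--                 raw_span = " ".join(tokens[j][0] for j in range(start, end))
--                 return raw_span, "hidden_scan"
--
--     return None
-- ===== SOURCE B (Python) =====
-- def _align_hidden(yields, available, tokens, consumed):
--     """Find where yields appears hidden in concatenated clue words."""
--     if not yields:
--         return None
--
--     target = yields.lower().replace(" ", "")
--     L = len(target)
--     n = len(tokens)
--
--     # Concatenate all fragments once, with prefix offsets off[k] = len of first k fragments.
--     off = [0]
--     for _, frag in tokens:
--         off.append(off[-1] + len(frag))
--     s = "".join(frag for _, frag in tokens)
--
--     for start in range(n):
--         # First occurrence of target at position >= off[start]; if none here,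
--         # no later start can have one either.
--         p = s.find(target, off[start])
--         if p == -1:
--             return None
--         # First index >= start that is not consumed.
--         j = start
--         while j < n and j in consumed:
--             j += 1
--         # Smallest end whose span covers the occurrence, is longer than target,
--         # and is not fully consumed (each condition is monotone in end).
--         end = start + 1
--         while end <= n and (off[end] < p + L or off[end] - off[start] <= L or end <= j):
--             end += 1
--         if end <= n:
--             return " ".join(t for t, _ in tokens[start:end]), "hidden_scan"
--     return None
-- ===== Notes on version B (the rewrite author's own statement) =====
-- stated objective: faster
-- what changed: Instead of re-concatenating and substring-testing every O(n^2) token span, B concatenates all fragments once with prefix offsets, does one s.find(target, off[start]) per start, and computes the first valid span end by a monotone threshold scan (covers the occurrence, longer than target, not fully consumed).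
import Mathlib
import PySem

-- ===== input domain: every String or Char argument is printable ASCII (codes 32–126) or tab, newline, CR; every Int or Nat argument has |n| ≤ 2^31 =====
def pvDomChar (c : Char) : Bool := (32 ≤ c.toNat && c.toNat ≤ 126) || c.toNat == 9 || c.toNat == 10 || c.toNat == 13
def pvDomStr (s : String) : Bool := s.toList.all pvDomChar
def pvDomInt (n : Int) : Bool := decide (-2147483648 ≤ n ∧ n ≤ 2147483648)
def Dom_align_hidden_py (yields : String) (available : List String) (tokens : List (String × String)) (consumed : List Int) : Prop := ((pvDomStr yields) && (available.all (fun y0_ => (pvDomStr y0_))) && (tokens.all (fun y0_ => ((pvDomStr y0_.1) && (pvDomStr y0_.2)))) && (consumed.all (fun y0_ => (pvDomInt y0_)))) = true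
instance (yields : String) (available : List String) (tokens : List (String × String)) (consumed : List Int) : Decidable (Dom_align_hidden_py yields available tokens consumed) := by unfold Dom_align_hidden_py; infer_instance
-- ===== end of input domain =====

-- B replaces A's scan over all O(n^2) token spans (each re-concatenated and substring-tested)
-- by one concatenation with prefix offsets, a single s.find(target, off[start]) per start and a
-- monotone threshold scan for the span end; objective: faster (asymptotic).

-- ===== PORT A =====
def align_hidden_py (yields : String) (available : List String) (tokens : List (String × String)) (consumed : List Int) : Option (String × String) :=
  if yields = "" then none
  else
    let target := PySem.Str.replace (PySem.Str.lower yields) " " ""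
    (PySem.List.pyRange 0 (tokens.length : Int)).findSome? (fun start =>
      (PySem.List.pyRange (start + 1) ((tokens.length : Int) + 1)).findSome? (fun e =>
        let indices := PySem.Set.ofList (PySem.List.pyRange start e)
        if PySem.Set.diff indices consumed = [] then none
        else
          let concat := PySem.Str.join "" ((PySem.List.pyRange start e).map (fun j => (PySem.List.pyGetD tokens j ("", "")).2))
          if PySem.Str.isIn target concat && !(concat = target) then
            some (PySem.Str.join " " ((PySem.List.pyRange start e).map (fun j => (PySem.List.pyGetD tokens j ("", "")).1)), "hidden_scan")
          else none))

-- ===== PORT B =====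
-- off = [0]; for _, frag in tokens: off.append(off[-1] + len(frag))
def altOff (tokens : List (String × String)) : List Int :=
  tokens.foldl (fun off t => off ++ [PySem.List.pyGetD off (-1) 0 + PySem.Str.len t.2]) [0]

-- while j < n and j in consumed: j += 1
def altScanJ (consumed : List Int) (n : Nat) : Nat → Nat → Nat
  | 0, j => j
  | fuel+1, j =>
    if j < n ∧ PySem.Set.contains consumed (j : Int) then altScanJ consumed n fuel (j+1) else j

-- while end <= n and (off[end] < p + L or off[end] - off[start] <= L or end <= j): end += 1
def altScanE (off : List Int) (pL offs L : Int) (j0 n : Nat) : Nat → Nat → Nat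
  | 0, e => e
  | fuel+1, e =>
    if e ≤ n ∧ (PySem.List.pyGetD off (e : Int) 0 < pL ∨
                PySem.List.pyGetD off (e : Int) 0 - offs ≤ L ∨ e ≤ j0)
    then altScanE off pL offs L j0 n fuel (e+1) else e

-- for start in range(n): ...
def altOuter (target s : String) (tokens : List (String × String)) (consumed : List Int)
    (off : List Int) (n : Nat) : Nat → Nat → Option (String × String)
  | 0, _ => none
  | fuel+1, start =>
    if start < n then
      let p := PySem.Str.findFrom s target (PySem.List.pyGetD off (start : Int) 0)
      if p = -1 then none
      else
        let j0 := altScanJ consumed n (n - start) start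
        let e := altScanE off (p + PySem.Str.len target) (PySem.List.pyGetD off (start : Int) 0)
                   (PySem.Str.len target) j0 n (n + 1 - (start + 1)) (start + 1)
        if e ≤ n then
          some (PySem.Str.join " " ((PySem.List.slice tokens (some (start : Int)) (some (e : Int))).map Prod.fst), "hidden_scan")
        else altOuter target s tokens consumed off n fuel (start + 1)
    else none

def align_hidden_py_alt (yields : String) (available : List String) (tokens : List (String × String)) (consumed : List Int) : Option (String × String) :=
  if yields = "" then none
  else
    let target := PySem.Str.replace (PySem.Str.lower yields) " " ""
    let n := tokens.length
    let off := altOff tokens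
    let s := PySem.Str.join "" (tokens.map (fun t => t.2))
    altOuter target s tokens consumed off n n 0

-- ===== PRECONDITION & SPEC =====
def Spec_align_hidden_py (yields : String) (available : List String) (tokens : List (String × String)) (consumed : List Int) (out : Option (String × String)) : Prop := out = align_hidden_py_alt yields available tokens consumed
instance (yields : String) (available : List String) (tokens : List (String × String)) (consumed : List Int) (out : Option (String × String)) : Decidable (Spec_align_hidden_py yields available tokens consumed out) := by unfold Spec_align_hidden_py; infer_instance

-- ===== CLAIM (what is proved, stated in full; the proofs are below) =====
def Claim_equal_align_hidden_py : Prop := ∀ (yields : String) (available : List String) (tokens : List (String × String)) (consumed : List Int), Dom_align_hidden_py yields available tokens consumed → Spec_align_hidden_py yields available tokens consumed (align_hidden_py yields available tokens consumed)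

-- ===== LEMMAS AND PROOFS =====

-- ----- proof-side abbreviations -----
def frg (tokens : List (String × String)) : List (List Char) := tokens.map (fun t => t.2.toList)

def offN (tokens : List (String × String)) (k : Nat) : Nat := (((frg tokens).take k).flatten).length

def SS (tokens : List (String × String)) : List Char := (frg tokens).flatten

-- ----- basic facts about the pieces both ports share -----
theorem chars_join_nil (l : List (List Char)) : PySem.Chars.join [] l = l.flatten := by
  unfold PySem.Chars.join List.intercalate
  induction l with
  | nil => rfl
  | cons x xs ih =>
    cases xs with
    | nil => simp
    | cons y ys => simp_all [List.intersperse]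

theorem pyRange_nat_map {α : Type} (tokens : List α) (d : α) (a e : Nat) (he : e ≤ tokens.length) :
    (PySem.List.pyRange (a : Int) (e : Int)).map (fun j => PySem.List.pyGetD tokens j d) =
      (tokens.drop a).take (e - a) := by
  by_cases hae : a ≤ e
  · obtain ⟨k, rfl⟩ : ∃ k, e = a + k := ⟨e - a, by omega⟩
    clear hae
    induction k generalizing a with
    | zero => simp [PySem.List.pyRange_one (a:Int) (a:Int)]
    | succ m ih =>
      rw [PySem.List.pyRange_one_cons (by omega), List.map_cons]
      have ha : a < tokens.length := by omega
      rw [PySem.List.pyGetD_natCast, List.getD_eq_getElem tokens d ha,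
        List.drop_eq_getElem_cons ha]
      have h2 := ih (a+1) (by omega)
      rw [show ((a:Int) + 1) = ((a+1 : Nat) : Int) by push_cast; ring,
        show a + (m+1) = (a+1) + m by omega] at *
      rw [h2, show a + 1 + m - a = (a + 1 + m - (a+1)) + 1 by omega, List.take_succ_cons]
  · rw [show (e - a) = 0 by omega]
    simp [PySem.List.pyRange_one (a:Int) (e:Int), show ((e:Int) - a).toNat = 0 by omega]

theorem offN_mono (tokens : List (String × String)) {k k' : Nat} (h : k ≤ k') :
    offN tokens k ≤ offN tokens k' := by
  unfold offN
  rw [show k' = k + (k' - k) by omega, List.take_add, List.flatten_append, List.length_append]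
  omega

theorem offN_top (tokens : List (String × String)) {k : Nat} (h : tokens.length ≤ k) :
    offN tokens k = (SS tokens).length := by
  unfold offN SS
  rw [List.take_of_length_le (by simp [frg]; omega)]

theorem frg_append (l r : List (String × String)) : frg (l ++ r) = frg l ++ frg r := by
  simp [frg]

theorem offN_append_le (l : List (String × String)) (t : List (String × String)) {k : Nat}
    (h : k ≤ l.length) : offN (l ++ t) k = offN l k := by
  unfold offN
  rw [frg_append, List.take_append_of_le_length (by simp [frg]; omega)]

theorem altOff_eq (tokens : List (String × String)) :
    altOff tokens = (List.range (tokens.length + 1)).map (fun k => (offN tokens k : Int)) := by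
  unfold altOff
  induction tokens using List.reverseRecOn with
  | nil => simp [offN]
  | append_singleton l t ih =>
    rw [List.foldl_append, ih, List.foldl_cons, List.foldl_nil]
    have hgl : PySem.List.pyGetD ((List.range (l.length + 1)).map (fun k => (offN l k : Int))) (-1) 0
        = (offN l l.length : Int) := by
      rw [show (-1 : Int) = -OfNat.ofNat 1 by rfl]
      rw [PySem.List.pyGetD_neg_ofNat _ 1 0 (by omega) (by simp)]
      simp
    rw [hgl]
    rw [List.length_append, List.length_singleton, List.range_succ (n := l.length + 1), List.map_append]
    congr 1
    · apply List.map_congr_left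
      intro k hk
      rw [List.mem_range] at hk
      rw [offN_append_le l [t] (by omega)]
    · simp only [List.map_cons, List.map_nil]
      congr 1
      have : offN (l ++ [t]) (l.length + 1) = offN l l.length + t.2.toList.length := by
        unfold offN
        rw [frg_append, List.take_of_length_le (by simp [frg])]
        rw [List.take_of_length_le (by simp [frg])]
        simp [frg]
      rw [this, PySem.Str.len]
      push_cast
      ring

theorem off_get (tokens : List (String × String)) {k : Nat} (h : k ≤ tokens.length) :
    PySem.List.pyGetD (altOff tokens) (k : Int) 0 = (offN tokens k : Int) := by
  rw [altOff_eq, PySem.List.pyGetD_natCast, List.getD_eq_getElem _ _ (by simp; omega)]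
  simp

theorem take_e_decomp (tokens : List (String × String)) {a e : Nat} (hae : a ≤ e) :
    (frg tokens).take e = (frg tokens).take a ++ ((frg tokens).drop a).take (e - a) := by
  rw [show e = a + (e - a) by omega, List.take_add]
  congr 2
  omega

theorem offN_sub (tokens : List (String × String)) {a e : Nat} (hae : a ≤ e) :
    offN tokens e - offN tokens a = (((frg tokens).drop a).take (e - a)).flatten.length := by
  unfold offN
  rw [take_e_decomp tokens hae, List.flatten_append, List.length_append]
  omega

theorem flatten_mid (tokens : List (String × String)) {a e : Nat} (hae : a ≤ e)
    (_he : e ≤ tokens.length) :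
    (((frg tokens).drop a).take (e - a)).flatten =
      ((SS tokens).drop (offN tokens a)).take (offN tokens e - offN tokens a) := by
  have hS : SS tokens = ((frg tokens).take a).flatten
      ++ (((frg tokens).drop a).take (e - a)).flatten ++ (((frg tokens).drop a).drop (e-a)).flatten := by
    unfold SS
    rw [← List.flatten_append, ← List.flatten_append, List.append_assoc, List.take_append_drop,
      List.take_append_drop]
  rw [hS, offN_sub tokens hae]
  show _ = (((((frg tokens).take a).flatten ++ _) ++ _).drop (offN tokens a)).take _
  rw [List.append_assoc, List.drop_left' (by rfl), List.take_left' (by rfl)]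

theorem length_mid (tokens : List (String × String)) {a e : Nat} (hae : a ≤ e)
    (he : e ≤ tokens.length) :
    (((SS tokens).drop (offN tokens a)).take (offN tokens e - offN tokens a)).length =
      offN tokens e - offN tokens a := by
  rw [← flatten_mid tokens hae he, ← offN_sub tokens hae]

theorem concat_toList (tokens : List (String × String)) {a e : Nat} (hae : a ≤ e)
    (he : e ≤ tokens.length) :
    (PySem.Str.join "" ((PySem.List.pyRange (a : Int) (e : Int)).map
        (fun j => (PySem.List.pyGetD tokens j ("", "")).2))).toList =
      ((SS tokens).drop (offN tokens a)).take (offN tokens e - offN tokens a) := by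
  rw [PySem.Str.toList_join, show ("" : String).toList = [] from rfl, chars_join_nil]
  rw [← flatten_mid tokens hae he]
  congr 1
  have : (fun (j:Int) => (PySem.List.pyGetD tokens j ("", "")).2) =
      (fun t => (t : String × String).2) ∘ (fun j => PySem.List.pyGetD tokens j ("", "")) := rfl
  rw [this, ← List.map_map, pyRange_nat_map tokens ("","") a e he]
  simp [frg, List.map_take, List.map_drop, List.map_map, Function.comp_def]

theorem toList_Sstr (tokens : List (String × String)) :
    (PySem.Str.join "" (tokens.map (fun t => t.2))).toList = SS tokens := by
  rw [PySem.Str.toList_join, show ("" : String).toList = [] from rfl, chars_join_nil]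
  simp [SS, frg, List.map_map, Function.comp_def]

theorem infix_iff_prefix_drop (T u : List Char) : T <:+: u ↔ ∃ j, T <+: u.drop j := by
  rw [← PySem.Chars.isIn_iff_infix, ← PySem.Chars.exists_prefix_drop_iff_isIn]

theorem infix_window (S T : List Char) (a b : Nat) (_hab : a ≤ b) (_hb : b ≤ S.length) :
    T <:+: (S.drop a).take (b - a) ↔ ∃ q, a ≤ q ∧ q + T.length ≤ b ∧ T <+: S.drop q := by
  rw [infix_iff_prefix_drop]
  constructor
  · rintro ⟨j, hj⟩
    rw [List.drop_take, List.prefix_take_iff, List.drop_drop] at hj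
    rcases Nat.eq_zero_or_pos T.length with hT | hT
    · exact ⟨a, le_refl _, by omega, by rw [List.eq_nil_of_length_eq_zero hT]; exact List.nil_prefix⟩
    · exact ⟨a + j, by omega, by omega, hj.1⟩
  · rintro ⟨q, hq1, hq2, hq3⟩
    refine ⟨q - a, ?_⟩
    rw [List.drop_take, List.prefix_take_iff, List.drop_drop,
      show a + (q - a) = q by omega]
    exact ⟨hq3, by omega⟩

theorem scanJ_spec (consumed : List Int) (n : Nat) :
    ∀ (fuel j : Nat), n ≤ j + fuel →
      j ≤ altScanJ consumed n fuel j ∧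
      (∀ i, j ≤ i → i < altScanJ consumed n fuel j → PySem.Set.contains consumed (i : Int) = true) ∧
      (altScanJ consumed n fuel j < n → PySem.Set.contains consumed ((altScanJ consumed n fuel j : Nat) : Int) = false) ∧
      (j ≤ n → altScanJ consumed n fuel j ≤ n) := by
  intro fuel
  induction fuel with
  | zero =>
    intro j hj
    simp only [altScanJ]
    exact ⟨le_refl _, by omega, by omega, by omega⟩
  | succ m ih =>
    intro j hj
    simp only [altScanJ]
    split
    · rename_i hcond
      obtain ⟨h1, h2, h3, h4⟩ := ih (j+1) (by omega)
      refine ⟨by omega, ?_, h3, fun _ => h4 (by omega)⟩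
      intro i hi1 hi2
      rcases Nat.eq_or_lt_of_le hi1 with rfl | h
      · exact hcond.2
      · exact h2 i (by omega) hi2
    · rename_i hcond
      refine ⟨le_refl _, by omega, ?_, by omega⟩
      intro hn
      rcases Decidable.not_and_iff_not_or_not.mp hcond with h | h
      · omega
      · simpa using h

theorem diffEmpty_iff (consumed : List Int) (s e : Nat) :
    (PySem.Set.diff (PySem.Set.ofList (PySem.List.pyRange (s : Int) (e : Int))) consumed = []) ↔
      (∀ j : Nat, s ≤ j → j < e → PySem.Set.contains consumed (j : Int) = true) := by
  unfold PySem.Set.diff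
  rw [List.filter_eq_nil_iff]
  constructor
  · intro h j hj1 hj2
    have hmem : (j : Int) ∈ PySem.Set.ofList (PySem.List.pyRange (s : Int) (e : Int)) := by
      rw [PySem.Set.mem_ofList, PySem.List.mem_pyRange_one]
      constructor <;> [exact_mod_cast hj1; exact_mod_cast hj2]
    have := h _ hmem
    simpa using this
  · intro h x hx
    rw [PySem.Set.mem_ofList, PySem.List.mem_pyRange_one] at hx
    have hx0 : 0 ≤ x := le_trans (by positivity) hx.1
    obtain ⟨j, rfl⟩ : ∃ j : Nat, x = (j : Int) := ⟨x.toNat, by omega⟩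
    have := h j (by exact_mod_cast hx.1) (by exact_mod_cast hx.2)
    simp only [this, Bool.not_true, Bool.false_eq_true, not_false_eq_true]
def Abody (target : String) (tokens : List (String × String)) (consumed : List Int)
    (start e : Int) : Option (String × String) :=
  if PySem.Set.diff (PySem.Set.ofList (PySem.List.pyRange start e)) consumed = [] then none
  else
    if PySem.Str.isIn target (PySem.Str.join "" ((PySem.List.pyRange start e).map (fun j => (PySem.List.pyGetD tokens j ("", "")).2))) &&
        !((PySem.Str.join "" ((PySem.List.pyRange start e).map (fun j => (PySem.List.pyGetD tokens j ("", "")).2))) = target) then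
      some (PySem.Str.join " " ((PySem.List.pyRange start e).map (fun j => (PySem.List.pyGetD tokens j ("", "")).1)), "hidden_scan")
    else none

theorem A_eq (yields : String) (available : List String) (tokens : List (String × String)) (consumed : List Int) :
    align_hidden_py yields available tokens consumed =
      if yields = "" then none
      else
        (PySem.List.pyRange 0 (tokens.length : Int)).findSome? (fun start =>
          (PySem.List.pyRange (start + 1) ((tokens.length : Int) + 1)).findSome?
            (Abody (PySem.Str.replace (PySem.Str.lower yields) " " "") tokens consumed start)) := rfl

def outB (tokens : List (String × String)) (s e : Nat) : String × String :=
  (PySem.Str.join " " ((PySem.List.slice tokens (some (s : Int)) (some (e : Int))).map Prod.fst), "hidden_scan")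

theorem outAB (tokens : List (String × String)) (s e : Nat) (he : e ≤ tokens.length) :
    (some (PySem.Str.join " " ((PySem.List.pyRange (s : Int) (e : Int)).map (fun j => (PySem.List.pyGetD tokens j ("", "")).1)), "hidden_scan") : Option (String × String)) = some (outB tokens s e) := by
  unfold outB
  congr 2
  have : (fun (j:Int) => (PySem.List.pyGetD tokens j ("", "")).1) =
      (fun t => (t : String × String).1) ∘ (fun j => PySem.List.pyGetD tokens j ("", "")) := rfl
  rw [this, ← List.map_map, pyRange_nat_map tokens ("","") s e he,
    PySem.List.slice_natCast]
theorem Abody_eq (target : String) (tokens : List (String × String)) (consumed : List Int)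
    (p : Int) (j0 s e : Nat) (hse : s < e) (hen : e ≤ tokens.length)
    (hp : PySem.Chars.findFrom (SS tokens) target.toList ((offN tokens s : Nat) : Int) = p)
    (hpne : p ≠ -1)
    (hj0 : j0 = altScanJ consumed tokens.length (tokens.length - s) s) :
    Abody target tokens consumed (s : Int) (e : Int) =
      if ((offN tokens e : Int) < p + PySem.Str.len target ∨
          (offN tokens e : Int) - (offN tokens s : Int) ≤ PySem.Str.len target ∨ e ≤ j0)
      then none else some (outB tokens s e) := by
  have hsn : s < tokens.length := by omega
  have hktop : offN tokens s ≤ (SS tokens).length := by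
    rw [← offN_top tokens (le_refl tokens.length)]; exact offN_mono tokens (by omega)
  have hetop : offN tokens e ≤ (SS tokens).length := by
    rw [← offN_top tokens (le_refl tokens.length)]; exact offN_mono tokens hen
  have hse' : offN tokens s ≤ offN tokens e := offN_mono tokens (by omega)
  obtain ⟨hps, hppre, hpmin⟩ :=
    PySem.Chars.findFrom_natCast_spec (SS tokens) target.toList (offN tokens s) hktop
      (by rw [hp]; exact hpne)
  rw [hp] at hps hppre hpmin
  have hp0 : 0 ≤ p := le_trans (by positivity) hps
  obtain ⟨hj1, hj2, hj3, hj4⟩ := scanJ_spec consumed tokens.length (tokens.length - s) s (by omega)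
  rw [← hj0] at hj1 hj2 hj3 hj4
  set concat := PySem.Str.join "" ((PySem.List.pyRange (s : Int) (e : Int)).map
      (fun j => (PySem.List.pyGetD tokens j ("", "")).2)) with hconcatdef
  have hconcat : concat.toList =
      ((SS tokens).drop (offN tokens s)).take (offN tokens e - offN tokens s) :=
    concat_toList tokens (by omega) hen
  have hclen : concat.toList.length = offN tokens e - offN tokens s := by
    rw [hconcat]; exact length_mid tokens (by omega) hen
  have hisin : PySem.Str.isIn target concat = true ↔
      p + PySem.Str.len target ≤ (offN tokens e : Int) := by
    rw [PySem.Str.isIn_iff_infix, hconcat,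
      infix_window (SS tokens) target.toList (offN tokens s) (offN tokens e) hse' hetop]
    unfold PySem.Str.len
    constructor
    · rintro ⟨q, hq1, hq2, hq3⟩
      have : ¬ q < p.toNat := fun hlt => hpmin q hq1 hlt hq3
      omega
    · intro h
      exact ⟨p.toNat, by omega, by omega, hppre⟩
  have hne : (concat = target) ↔ concat.toList = target.toList := String.toList_inj.symm
  by_cases hfull : e ≤ j0
  · rw [if_pos (by right; right; exact hfull)]
    unfold Abody
    rw [if_pos]
    rw [diffEmpty_iff]
    intro j hj hje
    exact hj2 j hj (by omega)
  · have hdiff : ¬ (PySem.Set.diff (PySem.Set.ofList (PySem.List.pyRange (s:Int) (e:Int))) consumed = []) := by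
      rw [diffEmpty_iff]
      intro h
      have hj0n : j0 < tokens.length := by omega
      have := h j0 hj1 (by omega)
      rw [hj3 hj0n] at this
      exact Bool.false_ne_true this
    unfold Abody
    rw [if_neg hdiff]
    rw [← hconcatdef]
    by_cases hC : ((offN tokens e : Int) < p + PySem.Str.len target ∨
        (offN tokens e : Int) - (offN tokens s : Int) ≤ PySem.Str.len target ∨ e ≤ j0)
    · rw [if_pos hC, if_neg]
      intro hcond
      rw [Bool.and_eq_true] at hcond
      obtain ⟨h1, h2⟩ := hcond
      rw [hisin] at h1
      rcases hC with hC | hC | hC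
      · omega
      · -- length ≤ L but target is infix: concat = target, contradicting h2
        have hinf : target.toList <:+: concat.toList := by
          rw [← PySem.Str.isIn_iff_infix, hisin]; omega
        have hLle := hinf.length_le
        have : concat = target := by
          rw [← String.toList_inj]
          exact (hinf.eq_of_length (by unfold PySem.Str.len at hC h1; omega)).symm
        simp [this] at h2
      · omega
    · have hC' := hC
      push Not at hC'
      obtain ⟨h1, h2, h3⟩ := hC'
      have hcondtrue : (PySem.Str.isIn target concat && !(concat = target)) = true := by
        rw [Bool.and_eq_true]
        refine ⟨hisin.mpr h1, ?_⟩
        have : concat ≠ target := by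
          rw [Ne, hne]
          intro heq
          have := congrArg List.length heq
          unfold PySem.Str.len at h2
          omega
        simpa using this
      rw [if_pos hcondtrue, if_neg hC]
      exact outAB tokens s e hen
theorem pyRange_empty_of_le {a b : Int} (h : b ≤ a) : PySem.List.pyRange a b = [] := by
  rw [PySem.List.pyRange_one a b, show (b - a).toNat = 0 by omega]
  rfl

theorem findSome?_cons_none {A B : Type} (f : A → Option B) (a : A) (l : List A)
    (h : f a = none) : (a :: l).findSome? f = l.findSome? f := by
  simp [h]

theorem findSome?_cons_some {A B : Type} (f : A → Option B) (a : A) (l : List A) (b : B)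
    (h : f a = some b) : (a :: l).findSome? f = some b := by
  simp [h]

theorem inner_eq (target : String) (tokens : List (String × String)) (consumed : List Int)
    (p : Int) (j0 s : Nat) (hs : s < tokens.length)
    (hp : PySem.Chars.findFrom (SS tokens) target.toList ((offN tokens s : Nat) : Int) = p)
    (hpne : p ≠ -1)
    (hj0 : j0 = altScanJ consumed tokens.length (tokens.length - s) s) :
    ∀ (fuel e0 : Nat), tokens.length + 1 ≤ e0 + fuel → s < e0 →
      (PySem.List.pyRange (e0 : Int) ((tokens.length : Int) + 1)).findSome?
          (Abody target tokens consumed (s : Int))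
        = (if altScanE (altOff tokens) (p + PySem.Str.len target)
              (PySem.List.pyGetD (altOff tokens) (s : Int) 0) (PySem.Str.len target)
              j0 tokens.length fuel e0 ≤ tokens.length
           then some (outB tokens s (altScanE (altOff tokens) (p + PySem.Str.len target)
              (PySem.List.pyGetD (altOff tokens) (s : Int) 0) (PySem.Str.len target)
              j0 tokens.length fuel e0))
           else none) := by
  have hoffs : PySem.List.pyGetD (altOff tokens) (s : Int) 0 = ((offN tokens s : Nat) : Int) :=
    off_get tokens (by omega)
  intro fuel
  induction fuel with
  | zero =>
    intro e0 he hse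
    rw [pyRange_empty_of_le (by omega)]
    simp only [altScanE, List.findSome?_nil]
    rw [if_neg (by omega)]
  | succ m ih =>
    intro e0 he hse
    by_cases he0 : e0 ≤ tokens.length
    · have hoffe : PySem.List.pyGetD (altOff tokens) (e0 : Int) 0 = ((offN tokens e0 : Nat) : Int) :=
        off_get tokens he0
      have hb := Abody_eq target tokens consumed p j0 s e0 hse he0 hp hpne hj0
      have hscan : altScanE (altOff tokens) (p + PySem.Str.len target)
            (PySem.List.pyGetD (altOff tokens) (s : Int) 0) (PySem.Str.len target)
            j0 tokens.length (m+1) e0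
          = if (e0 ≤ tokens.length ∧ ((offN tokens e0 : Int) < p + PySem.Str.len target ∨
              (offN tokens e0 : Int) - (offN tokens s : Int) ≤ PySem.Str.len target ∨ e0 ≤ j0))
            then altScanE (altOff tokens) (p + PySem.Str.len target)
              (PySem.List.pyGetD (altOff tokens) (s : Int) 0) (PySem.Str.len target)
              j0 tokens.length m (e0+1)
            else e0 := by
        simp only [altScanE, hoffe, hoffs]
      rw [PySem.List.pyRange_one_cons (by omega)]
      by_cases hC : ((offN tokens e0 : Int) < p + PySem.Str.len target ∨
          (offN tokens e0 : Int) - (offN tokens s : Int) ≤ PySem.Str.len target ∨ e0 ≤ j0)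
      · rw [findSome?_cons_none _ _ _ (by rw [hb, if_pos hC])]
        have hcond : e0 ≤ tokens.length ∧ ((offN tokens e0 : Int) < p + PySem.Str.len target ∨
            (offN tokens e0 : Int) - (offN tokens s : Int) ≤ PySem.Str.len target ∨ e0 ≤ j0) := ⟨he0, hC⟩
        rw [hscan, if_pos hcond]
        have h2 := ih (e0 + 1) (by omega) (by omega)
        push_cast at h2
        exact h2
      · rw [findSome?_cons_some _ _ _ (outB tokens s e0) (by rw [hb, if_neg hC])]
        have hcond : ¬ (e0 ≤ tokens.length ∧ ((offN tokens e0 : Int) < p + PySem.Str.len target ∨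
            (offN tokens e0 : Int) - (offN tokens s : Int) ≤ PySem.Str.len target ∨ e0 ≤ j0)) :=
          fun h => hC h.2
        rw [hscan, if_neg hcond, if_pos he0]
    · rw [pyRange_empty_of_le (by omega)]
      have hscan : altScanE (altOff tokens) (p + PySem.Str.len target)
            (PySem.List.pyGetD (altOff tokens) (s : Int) 0) (PySem.Str.len target)
            j0 tokens.length (m+1) e0 = e0 := by
        simp only [altScanE]
        rw [if_neg (fun h => he0 h.1)]
      rw [List.findSome?_nil, hscan, if_neg he0]
theorem Abody_none_of_nofind (target : String) (tokens : List (String × String))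
    (consumed : List Int) (s st e : Nat) (hsst : s ≤ st) (hste : st < e)
    (he : e ≤ tokens.length)
    (hfind : PySem.Chars.findFrom (SS tokens) target.toList ((offN tokens s : Nat) : Int) = -1) :
    Abody target tokens consumed (st : Int) (e : Int) = none := by
  have hktop : offN tokens s ≤ (SS tokens).length := by
    rw [← offN_top tokens (le_refl tokens.length)]; exact offN_mono tokens (by omega)
  have hetop : offN tokens e ≤ (SS tokens).length := by
    rw [← offN_top tokens (le_refl tokens.length)]; exact offN_mono tokens he
  have hnoinf : ¬ target.toList <:+: (SS tokens).drop (offN tokens s) :=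
    (PySem.Chars.findFrom_natCast_eq_neg_one_iff (SS tokens) target.toList (offN tokens s) hktop).mp hfind
  unfold Abody
  split
  · rfl
  · have hisin : PySem.Str.isIn target (PySem.Str.join "" ((PySem.List.pyRange (st : Int) (e : Int)).map
        (fun j => (PySem.List.pyGetD tokens j ("", "")).2))) = false := by
      rw [← Bool.not_eq_true, PySem.Str.isIn_iff_infix, concat_toList tokens (by omega) he,
        infix_window (SS tokens) target.toList (offN tokens st) (offN tokens e)
          (offN_mono tokens (by omega)) hetop]
      rintro ⟨q, hq1, hq2, hq3⟩
      apply hnoinf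
      rw [infix_iff_prefix_drop]
      refine ⟨q - offN tokens s, ?_⟩
      have hsq : offN tokens s ≤ q := le_trans (offN_mono tokens hsst) hq1
      rw [List.drop_drop, show offN tokens s + (q - offN tokens s) = q by omega]
      exact hq3
    rw [hisin]
    simp

theorem outer_eq (target : String) (tokens : List (String × String)) (consumed : List Int) :
    ∀ (fuel s : Nat), tokens.length ≤ s + fuel →
      (PySem.List.pyRange (s : Int) (tokens.length : Int)).findSome? (fun st =>
          (PySem.List.pyRange (st + 1) ((tokens.length : Int) + 1)).findSome?
            (Abody target tokens consumed st))
        = altOuter target (PySem.Str.join "" (tokens.map (fun t => t.2))) tokens consumed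
            (altOff tokens) tokens.length fuel s := by
  intro fuel
  induction fuel with
  | zero =>
    intro s hs
    rw [pyRange_empty_of_le (by omega)]
    simp only [altOuter, List.findSome?_nil]
  | succ m ih =>
    intro s hs
    by_cases hsn : s < tokens.length
    · have hoffs : PySem.List.pyGetD (altOff tokens) (s : Int) 0 = ((offN tokens s : Nat) : Int) :=
        off_get tokens (by omega)
      have hfind : PySem.Str.findFrom (PySem.Str.join "" (tokens.map (fun t => t.2))) target
            (PySem.List.pyGetD (altOff tokens) (s : Int) 0)
          = PySem.Chars.findFrom (SS tokens) target.toList ((offN tokens s : Nat) : Int) := by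
        rw [PySem.Str.findFrom_eq, toList_Sstr, hoffs]
      simp only [altOuter]
      rw [if_pos hsn, hfind]
      by_cases hpm : PySem.Chars.findFrom (SS tokens) target.toList ((offN tokens s : Nat) : Int) = -1
      · rw [if_pos hpm]
        rw [List.findSome?_eq_none_iff]
        intro st hst
        rw [PySem.List.mem_pyRange_one] at hst
        have h0st : (0:Int) ≤ st := le_trans (by positivity) hst.1
        obtain ⟨stn, rfl⟩ : ∃ k : Nat, st = (k : Int) := ⟨st.toNat, by omega⟩
        rw [List.findSome?_eq_none_iff]
        intro e he
        rw [PySem.List.mem_pyRange_one] at he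
        obtain ⟨en, rfl⟩ : ∃ k : Nat, e = (k : Int) := ⟨e.toNat, by omega⟩
        exact Abody_none_of_nofind target tokens consumed s stn en
          (by exact_mod_cast hst.1) (by exact_mod_cast (by omega : (stn:Int) < en))
          (by exact_mod_cast (by omega : (en:Int) ≤ (tokens.length:Int))) hpm
      · rw [if_neg hpm]
        have hinner := inner_eq target tokens consumed
          (PySem.Chars.findFrom (SS tokens) target.toList ((offN tokens s : Nat) : Int))
          (altScanJ consumed tokens.length (tokens.length - s) s) s hsn rfl hpm rfl
          (tokens.length + 1 - (s + 1)) (s + 1) (by omega) (by omega)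
        rw [PySem.List.pyRange_one_cons (by omega)]
        set eres := altScanE (altOff tokens)
          (PySem.Chars.findFrom (SS tokens) target.toList ((offN tokens s : Nat) : Int) + PySem.Str.len target)
          (PySem.List.pyGetD (altOff tokens) (s : Int) 0) (PySem.Str.len target)
          (altScanJ consumed tokens.length (tokens.length - s) s) tokens.length
          (tokens.length + 1 - (s + 1)) (s + 1) with heres
        by_cases hEn : eres ≤ tokens.length
        · rw [findSome?_cons_some _ _ _ (outB tokens s eres) (by
            rw [show ((s:Int) + 1) = ((s + 1 : Nat) : Int) by push_cast; ring, hinner, if_pos hEn])]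
          rw [if_pos hEn]
          rfl
        · rw [findSome?_cons_none _ _ _ (by
            rw [show ((s:Int) + 1) = ((s + 1 : Nat) : Int) by push_cast; ring, hinner, if_neg hEn])]
          rw [if_neg hEn]
          have := ih (s+1) (by omega)
          rw [show ((s:Int) + 1) = ((s + 1 : Nat) : Int) by push_cast; ring]
          exact this
    · rw [pyRange_empty_of_le (by omega)]
      simp only [altOuter, List.findSome?_nil]
      rw [if_neg hsn]
theorem align_hidden_py_spec : Claim_equal_align_hidden_py := by
  unfold Claim_equal_align_hidden_py
  intro yields available tokens consumed _dom
  unfold Spec_align_hidden_py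
  rw [A_eq]
  unfold align_hidden_py_alt
  by_cases hy : yields = ""
  · rw [if_pos hy, if_pos hy]
  · rw [if_neg hy, if_neg hy]
    have h := outer_eq (PySem.Str.replace (PySem.Str.lower yields) " " "") tokens consumed
      tokens.length 0 (by omega)
    rw [Nat.cast_zero] at h
    exact h
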